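-- pv_equiv track=rewrite | github.com/kavigupta/section_summary | analyze_data.py | recent_effort
-- ===== SOURCE A (Python) =====
-- def recent_effort(row, cols):
--     lab = hw = disc = 0
--     for col, val in zip(cols, row):
--         if col.startswith("disc"):
--             disc = val
--         if col.startswith("lab"):
--             lab = val
--         if col.startswith("hw"):
--             hw = val
--     return 2 * (disc + lab) + hw
-- ===== SOURCE B (Python) =====
-- def recent_effort(row, cols):
--     def last(prefix):
--         for col, val in reversed(list(zip(cols, row))):
--             if col.startswith(prefix):
--                 return val
--         return 0
--     return 2 * (last("disc") + last("lab")) + last("hw")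
-- ===== Notes on version B (the rewrite author's own statement) =====
-- stated objective: alternative
-- what changed: Replaces the single forward fold that keeps overwriting three accumulators with three independent reverse early-exit scans, one per column prefix, each returning the last matching value (0 if none).
import Mathlib
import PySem

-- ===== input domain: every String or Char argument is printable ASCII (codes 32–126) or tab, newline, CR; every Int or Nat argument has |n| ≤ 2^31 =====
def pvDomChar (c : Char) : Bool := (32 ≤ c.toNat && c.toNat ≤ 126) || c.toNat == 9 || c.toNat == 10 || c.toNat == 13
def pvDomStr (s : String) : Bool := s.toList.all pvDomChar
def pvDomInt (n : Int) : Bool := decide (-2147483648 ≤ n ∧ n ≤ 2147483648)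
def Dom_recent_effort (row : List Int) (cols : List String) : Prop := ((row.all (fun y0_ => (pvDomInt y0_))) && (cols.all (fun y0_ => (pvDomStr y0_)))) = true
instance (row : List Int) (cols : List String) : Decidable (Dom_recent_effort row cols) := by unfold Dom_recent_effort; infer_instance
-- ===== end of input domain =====

-- ===== PORT A =====
-- One honest line: B replaces A's fused forward fold over three accumulators with three
-- independent reverse early-exit scans (one per pfx); alternative decomposition, same cost.
def recent_effort (row : List Int) (cols : List String) : Int :=
  let s := (List.zip cols row).foldl
    (fun (acc : Int × Int × Int) cv =>
      let disc := if PySem.Str.startswith cv.1 "disc" then cv.2 else acc.1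
      let lab  := if PySem.Str.startswith cv.1 "lab" then cv.2 else acc.2.1
      let hw   := if PySem.Str.startswith cv.1 "hw" then cv.2 else acc.2.2
      (disc, lab, hw)) (0, 0, 0)
  2 * (s.1 + s.2.1) + s.2.2

-- ===== PORT B =====
-- helper: first value whose column starts with the pfx, scanning the given (reversed) list; 0 if none
def pvLast (pfx : String) : List (String × Int) → Int
  | [] => 0
  | (c, v) :: rest => if PySem.Str.startswith c pfx then v else pvLast pfx rest

def recent_effort_alt (row : List Int) (cols : List String) : Int :=
  let rev := (List.zip cols row).reverse
  2 * (pvLast "disc" rev + pvLast "lab" rev) + pvLast "hw" rev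

-- ===== PRECONDITION & SPEC =====
def Spec_recent_effort (row : List Int) (cols : List String) (out : Int) : Prop := out = recent_effort_alt row cols
instance (row : List Int) (cols : List String) (out : Int) : Decidable (Spec_recent_effort row cols out) := by unfold Spec_recent_effort; infer_instance

-- ===== CLAIM (what is proved, stated in full; the proofs are below) =====
def Claim_equal_recent_effort : Prop := ∀ (row : List Int) (cols : List String), Dom_recent_effort row cols → Spec_recent_effort row cols (recent_effort row cols)

-- ===== LEMMAS AND PROOFS =====
-- pvLast with an explicit default, to state the fold invariant
def pvLastD (pfx : String) (d : Int) : List (String × Int) → Int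
  | [] => d
  | (c, v) :: rest => if PySem.Str.startswith c pfx then v else pvLastD pfx d rest

theorem pvLast_eq_pvLastD (p : String) (l : List (String × Int)) :
    pvLast p l = pvLastD p 0 l := by
  induction l with
  | nil => rfl
  | cons x r ih => cases x; simp [pvLast, pvLastD, ih]

theorem pvLastD_append (p : String) (d : Int) (xs ys : List (String × Int)) :
    pvLastD p d (xs ++ ys) = pvLastD p (pvLastD p d ys) xs := by
  induction xs with
  | nil => rfl
  | cons x r ih => cases x; simp [pvLastD, ih]

theorem fold_eq_lastD (l : List (String × Int)) (d lb hw : Int) :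
    l.foldl
      (fun (acc : Int × Int × Int) cv =>
        let disc := if PySem.Str.startswith cv.1 "disc" then cv.2 else acc.1
        let lab  := if PySem.Str.startswith cv.1 "lab" then cv.2 else acc.2.1
        let hwv  := if PySem.Str.startswith cv.1 "hw" then cv.2 else acc.2.2
        (disc, lab, hwv)) (d, lb, hw)
    = (pvLastD "disc" d l.reverse, pvLastD "lab" lb l.reverse, pvLastD "hw" hw l.reverse) := by
  induction l generalizing d lb hw with
  | nil => rfl
  | cons x r ih =>
    cases x with
    | mk c v =>
      simp only [List.foldl, List.reverse_cons, pvLastD_append, ih]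
      rfl

-- ===== VERDICT (by name: the statement is the Claim_ definition above) =====
theorem recent_effort_spec : Claim_equal_recent_effort := by
  intro row cols _
  unfold Spec_recent_effort recent_effort recent_effort_alt
  simp only [fold_eq_lastD, pvLast_eq_pvLastD]
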